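-- pv_equiv track=rewrite | github.com/lperezmo/epistasis-v2 | python/epistasis/mapping.py | genotype_coeffs
-- ===== SOURCE A (Python) =====
-- import itertools as it
--
-- def genotype_coeffs(genotype: str, order: int | None = None) -> list[list[int]]:
--     """List all epistatic coefficients touching a binary genotype up to `order`.
--
--     The intercept is returned as `[0]`. Mutation indices are 1-based positions
--     (matching the binary-vector layout used by the design matrix).
--     """
--     if order is None:
--         order = len(genotype)
--     mutations = [i + 1 for i, c in enumerate(genotype) if c == "1"]
--     coeffs: list[list[int]] = [[0]]
--     for o in range(1, order + 1):
--         coeffs.extend(list(z) for z in it.combinations(mutations, o))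
--     return coeffs
-- ===== SOURCE B (Python) =====
-- def genotype_coeffs(genotype: str, order: int | None = None) -> list[list[int]]:
--     """List all epistatic coefficients touching a binary genotype up to `order`.
--
--     Levelwise expansion: each level keeps (combo, remaining suffix) pairs and
--     extends every combo with each element of its suffix, which enumerates the
--     combinations of each size in itertools order without calling itertools.
--     """
--     if order is None:
--         order = len(genotype)
--     mutations = [i + 1 for i, c in enumerate(genotype) if c == "1"]
--     result = [[0]]
--     level = [([], mutations)]
--     o = 0
--     while o < order and level:
--         nxt = []
--         for combo, rest in level:
--             for j, m in enumerate(rest):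
--                 nxt.append((combo + [m], rest[j + 1:]))
--         result.extend(c for c, _ in nxt)
--         level = nxt
--         o += 1
--     return result
-- ===== Notes on version B (the rewrite author's own statement) =====
-- stated objective: alternative
-- what changed: Replaces the per-order itertools.combinations calls by a single levelwise expansion that keeps (combo, remaining-suffix) pairs and extends each combo with every element of its suffix, stopping early once a level is empty.
import Mathlib
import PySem

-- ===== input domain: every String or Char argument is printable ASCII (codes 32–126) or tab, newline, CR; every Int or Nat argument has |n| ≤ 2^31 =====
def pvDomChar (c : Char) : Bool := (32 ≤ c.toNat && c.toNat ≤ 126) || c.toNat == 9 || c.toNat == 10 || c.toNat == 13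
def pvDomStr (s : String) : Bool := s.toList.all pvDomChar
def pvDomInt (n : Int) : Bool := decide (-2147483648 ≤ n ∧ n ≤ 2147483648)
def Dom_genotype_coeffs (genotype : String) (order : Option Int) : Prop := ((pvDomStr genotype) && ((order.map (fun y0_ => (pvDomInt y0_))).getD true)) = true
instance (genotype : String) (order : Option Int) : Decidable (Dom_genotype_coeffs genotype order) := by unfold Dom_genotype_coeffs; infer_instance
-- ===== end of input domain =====

-- B replaces the per-order itertools.combinations calls by a single levelwise expansion
-- of (combo, remaining-suffix) pairs (objective: alternative decomposition, same output).

-- ===== PORT A =====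
-- it.combinations(mutations, o): standard recursive generator, yields in itertools
-- (lexicographic-by-position) order; exact for any input list.
def pvCombos : Nat → List Int → List (List Int)
  | 0, _ => [[]]
  | _ + 1, [] => []
  | k + 1, x :: xs => (pvCombos k xs).map (fun z => x :: z) ++ pvCombos (k + 1) xs

def genotype_coeffs (genotype : String) (order : Option Int) : List (List Int) :=
  let order' : Int := match order with
    | none => PySem.Str.len genotype
    | some o => o
  let mutations : List Int :=
    ((PySem.List.enumerate genotype.toList 0).filter (fun p => p.2 == '1')).map (fun p => p.1 + 1)
  (PySem.List.pyRange 1 (order' + 1) 1).foldl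
    (fun acc o => acc ++ pvCombos o.toNat mutations) [[(0 : Int)]]

-- ===== PORT B =====
-- one level step: extend every (combo, rest) by each element of rest, keeping the suffix
-- after it; rest[j+1:] = drop (j+1) is exact since enumerate indices j are ≥ 0
def pvNextLevel (level : List (List Int × List Int)) : List (List Int × List Int) :=
  level.flatMap (fun p =>
    (PySem.List.enumerate p.2 0).map (fun q => (p.1 ++ [q.2], p.2.drop (q.1 + 1).toNat)))

-- the 'while o < order and level:' loop; runs at most order.toNat times, stops when level is empty
def pvLoopB : Nat → List (List Int × List Int) → List (List Int) → List (List Int)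
  | 0, _, result => result
  | k + 1, level, result =>
    if level = [] then result
    else
      let nxt := pvNextLevel level
      pvLoopB k nxt (result ++ nxt.map (·.1))

def genotype_coeffs_alt (genotype : String) (order : Option Int) : List (List Int) :=
  let order' : Int := match order with
    | none => PySem.Str.len genotype
    | some o => o
  let mutations : List Int :=
    ((PySem.List.enumerate genotype.toList 0).filter (fun p => p.2 == '1')).map (fun p => p.1 + 1)
  pvLoopB order'.toNat [([], mutations)] [[(0 : Int)]]

-- ===== PRECONDITION & SPEC =====
def Spec_genotype_coeffs (genotype : String) (order : Option Int) (out : List (List Int)) : Prop := out = genotype_coeffs_alt genotype order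
instance (genotype : String) (order : Option Int) (out : List (List Int)) : Decidable (Spec_genotype_coeffs genotype order out) := by unfold Spec_genotype_coeffs; infer_instance

-- ===== CLAIM (what is proved, stated in full; the proofs are below) =====
def Claim_equal_genotype_coeffs : Prop := ∀ (genotype : String) (order : Option Int), Dom_genotype_coeffs genotype order → Spec_genotype_coeffs genotype order (genotype_coeffs genotype order)

-- ===== LEMMAS AND PROOFS =====

-- combinations together with the suffix that remains after the last chosen element
def pvCombosR : Nat → List Int → List (List Int × List Int)
  | 0, xs => [([], xs)]
  | _ + 1, [] => []
  | k + 1, x :: xs => (pvCombosR k xs).map (fun q => (x :: q.1, q.2)) ++ pvCombosR (k + 1) xs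

theorem combosR_fst (xs : List Int) : ∀ k : Nat, (pvCombosR k xs).map (·.1) = pvCombos k xs := by
  induction xs with
  | nil => intro k; cases k <;> simp [pvCombosR, pvCombos]
  | cons x xs ih =>
    intro k
    cases k with
    | zero => simp [pvCombosR, pvCombos]
    | succ k =>
      simp [pvCombosR, pvCombos, ← ih, List.map_map, Function.comp_def]

theorem enumerate_shift {α : Type} (xs : List α) : ∀ s : Int,
    PySem.List.enumerate xs (s + 1) = (PySem.List.enumerate xs s).map (fun q => (q.1 + 1, q.2)) := by
  induction xs with
  | nil => intro s; simp [PySem.List.enumerate_nil]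
  | cons x xs ih => intro s; simp [PySem.List.enumerate_cons, ih]

theorem fst_nonneg_enumerate {α : Type} (xs : List α) (q : Int × α)
    (h : q ∈ PySem.List.enumerate xs 0) : 0 ≤ q.1 := by
  rcases (PySem.List.mem_enumerate_iff xs 0 q).1 h with ⟨k, hk, rfl⟩
  simp

theorem pvExpand_eq (xs : List Int) : ∀ c : List Int,
    (PySem.List.enumerate xs 0).map (fun q => (c ++ [q.2], xs.drop (q.1 + 1).toNat))
      = (pvCombosR 1 xs).map (fun q => (c ++ q.1, q.2)) := by
  induction xs with
  | nil => intro c; simp [PySem.List.enumerate_nil, pvCombosR]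
  | cons x xs ih =>
    intro c
    rw [PySem.List.enumerate_cons, List.map_cons, enumerate_shift xs 0, List.map_map]
    have hcong : ((PySem.List.enumerate xs 0).map
        ((fun q => (c ++ [q.2], (x :: xs).drop (q.1 + 1).toNat)) ∘ (fun q => (q.1 + 1, q.2))))
        = (PySem.List.enumerate xs 0).map (fun q => (c ++ [q.2], xs.drop (q.1 + 1).toNat)) := by
      apply List.map_congr_left
      intro q hq
      have h0 : 0 ≤ q.1 := fst_nonneg_enumerate xs q hq
      have hdrop : (q.1 + 1 + 1).toNat = (q.1 + 1).toNat + 1 := by omega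
      simp [Function.comp, hdrop]
    rw [hcong, ih c]
    simp [pvCombosR]

theorem nextLevel_combosR (xs : List Int) : ∀ (k : Nat) (c : List Int),
    pvNextLevel ((pvCombosR k xs).map (fun q => (c ++ q.1, q.2)))
      = (pvCombosR (k + 1) xs).map (fun q => (c ++ q.1, q.2)) := by
  induction xs with
  | nil =>
    intro k c
    cases k with
    | zero => simp [pvCombosR, pvNextLevel, PySem.List.enumerate_nil]
    | succ k => simp [pvCombosR, pvNextLevel]
  | cons x xs ih =>
    intro k c
    cases k with
    | zero =>
      simpa [pvCombosR, pvNextLevel] using pvExpand_eq (x :: xs) c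
    | succ k =>
      have hpref : ∀ (l : List (List Int × List Int)),
          (l.map (fun q => (x :: q.1, q.2))).map (fun q => (c ++ q.1, q.2))
            = l.map (fun q => ((c ++ [x]) ++ q.1, q.2)) := by
        intro l; rw [List.map_map]; apply List.map_congr_left; intro q _; simp
      show pvNextLevel (((pvCombosR k xs).map (fun q => (x :: q.1, q.2))
          ++ pvCombosR (k + 1) xs).map (fun q => (c ++ q.1, q.2))) = _
      rw [List.map_append, hpref]
      have hsplit : ∀ (l₁ l₂ : List (List Int × List Int)),
          pvNextLevel (l₁ ++ l₂) = pvNextLevel l₁ ++ pvNextLevel l₂ := by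
        intro l₁ l₂; simp [pvNextLevel]
      rw [hsplit, ih k (c ++ [x]), ih (k + 1) c]
      show _ = ((pvCombosR (k + 1) xs).map (fun q => (x :: q.1, q.2))
          ++ pvCombosR (k + 2) xs).map (fun q => (c ++ q.1, q.2))
      rw [List.map_append, hpref]

theorem combosR_nil_succ (xs : List Int) : ∀ k : Nat,
    pvCombosR k xs = [] → pvCombosR (k + 1) xs = [] := by
  induction xs with
  | nil => intro k _; cases k <;> simp [pvCombosR]
  | cons x xs ih =>
    intro k h
    cases k with
    | zero => simp [pvCombosR] at h
    | succ k =>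
      simp only [pvCombosR, List.append_eq_nil_iff, List.map_eq_nil_iff] at h ⊢
      exact ⟨by simp [h.2], ih (k + 1) h.2⟩

theorem combosR_nil_add (xs : List Int) (k : Nat) (h : pvCombosR k xs = []) :
    ∀ j : Nat, pvCombosR (k + j) xs = [] := by
  intro j
  induction j with
  | zero => simpa using h
  | succ j ihj => exact combosR_nil_succ xs (k + j) ihj

theorem loopB_eq (xs : List Int) : ∀ (n k : Nat) (acc : List (List Int)),
    pvLoopB n (pvCombosR k xs) acc
      = acc ++ (List.range n).flatMap (fun i => pvCombos (k + 1 + i) xs) := by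
  intro n
  induction n with
  | zero => intro k acc; simp [pvLoopB]
  | succ n ih =>
    intro k acc
    by_cases h : pvCombosR k xs = []
    · have hall : ∀ i : Nat, pvCombos (k + 1 + i) xs = [] := by
        intro i
        have := combosR_nil_add xs k h (1 + i)
        rw [← combosR_fst]
        rw [show k + 1 + i = k + (1 + i) by omega, this]
        rfl
      rw [h]
      simp [pvLoopB, hall]
    · rw [pvLoopB, if_neg h]
      have hnext : pvNextLevel (pvCombosR k xs) = pvCombosR (k + 1) xs := by
        have := nextLevel_combosR xs k []
        simpa using this
      rw [hnext, ih (k + 1)]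
      rw [List.range_succ_eq_map]
      simp only [List.flatMap_cons, List.flatMap_map]
      have hidx : ∀ i : Nat, pvCombos (k + 1 + Nat.succ i) xs = pvCombos (k + 1 + 1 + i) xs := by
        intro i; congr 1; omega
      simp only [hidx]
      rw [combosR_fst xs (k + 1)]
      simp

theorem sides_eq (n : Int) (muts : List Int) :
    (PySem.List.pyRange 1 (n + 1) 1).foldl
        (fun acc o => acc ++ pvCombos o.toNat muts) [[(0 : Int)]]
      = pvLoopB n.toNat [([], muts)] [[(0 : Int)]] := by
  rw [PySem.List.foldl_append_eq_flatMap]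
  rw [PySem.List.pyRange_one]
  have hn : (n + 1 - 1).toNat = n.toNat := by omega
  rw [hn, List.flatMap_map]
  have hidx : ∀ k : Nat, ((1 : Int) + (k : Int)).toNat = k + 1 := by intro k; omega
  have hstart : ([([], muts)] : List (List Int × List Int)) = pvCombosR 0 muts := by
    simp [pvCombosR]
  rw [hstart, loopB_eq muts n.toNat 0]
  simp only [hidx]
  have hfun : ∀ i : Nat, pvCombos (i + 1) muts = pvCombos (0 + 1 + i) muts := by
    intro i; congr 1; omega
  simp only [hfun]

-- ===== VERDICT (by name: the statement is the Claim_ definition above) =====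
theorem genotype_coeffs_spec : Claim_equal_genotype_coeffs := by
  intro genotype order _
  unfold Spec_genotype_coeffs genotype_coeffs genotype_coeffs_alt
  exact sides_eq _ _
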